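-- pv_equiv track=rewrite | github.com/tsgoten/eluvio-summer-internship-submission | 3_solution.py | streak
-- ===== SOURCE A (Python) =====
-- def streak(arr, n, strt):
--   count = 0
--   result = 0
--   res_ind = 0
--   for i in range(0, n):
--     if (arr[i] == 0):
--       count = 0
--     else:
--       count+= 1
--       if count > result:
--         result = count
--         res_ind = i
--   return result, res_ind - result + 1, strt
-- ===== SOURCE B (Python) =====
-- def streak(arr, n, strt):
--     # Pass 1: collect every maximal non-zero run as (length, end_index).
--     runs = []
--     run_len = 0
--     for i in range(n):
--         if arr[i] != 0:
--             run_len += 1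
--         else:
--             if run_len:
--                 runs.append((run_len, i - 1))
--             run_len = 0
--     if run_len:
--         runs.append((run_len, n - 1))
--     # Pass 2: first run of maximal length; defaults give (0, 1, strt).
--     best_len, best_end = 0, 0
--     for length, end in runs:
--         if length > best_len:
--             best_len, best_end = length, end
--     return best_len, best_end - best_len + 1, strt
-- ===== Notes on version B (the rewrite author's own statement) =====
-- stated objective: alternative
-- what changed: B first segments arr[:n] into a list of maximal non-zero runs (length, end_index) and then, in a separate pass, picks the first run of maximal length, instead of A's single fold that eagerly tracks count/result/res_ind; the (0,1,strt) all-zero result falls out of the same final arithmetic.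
import Mathlib
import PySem

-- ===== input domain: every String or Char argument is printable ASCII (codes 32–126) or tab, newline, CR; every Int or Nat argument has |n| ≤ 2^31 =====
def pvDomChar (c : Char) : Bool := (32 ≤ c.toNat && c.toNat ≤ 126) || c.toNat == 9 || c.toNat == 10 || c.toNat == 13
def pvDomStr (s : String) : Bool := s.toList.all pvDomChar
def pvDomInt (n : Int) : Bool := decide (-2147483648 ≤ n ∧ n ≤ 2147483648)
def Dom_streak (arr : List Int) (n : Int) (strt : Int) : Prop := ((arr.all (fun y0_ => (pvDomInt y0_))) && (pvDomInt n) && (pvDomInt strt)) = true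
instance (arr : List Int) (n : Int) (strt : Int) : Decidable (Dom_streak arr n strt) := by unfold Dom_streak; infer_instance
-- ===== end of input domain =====

-- B replaces A's single eager-maximum fold by two passes: first it collects the maximal
-- non-zero runs of arr[:n] as (length, end_index) pairs, then it picks the first run of
-- maximal length; objective: alternative decomposition (same O(n) cost).

-- ===== PORT A =====
-- loop body of A (same branches, same order)
def stepA (s : Int × Int × Int) (i : Int) (x : Int) : Int × Int × Int :=
  if x = 0 then (0, s.2.1, s.2.2)
  else
    if s.1 + 1 > s.2.1 then (s.1 + 1, s.1 + 1, i) else (s.1 + 1, s.2.1, s.2.2)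

def streak (arr : List Int) (n : Int) (strt : Int) : Int × Int × Int :=
  -- arr[i]: in range for every i of range(0,n) under Pre_streak
  let s := (PySem.List.pyRange 0 n 1).foldl
    (fun s i => stepA s i (PySem.List.pyGetD arr i 0)) (0, 0, 0)
  (s.2.1, s.2.2 - s.2.1 + 1, strt)

-- ===== PORT B =====
-- body of B's first (run-collecting) loop
def stepB (s : List (Int × Int) × Int) (i : Int) (x : Int) : List (Int × Int) × Int :=
  if x ≠ 0 then (s.1, s.2 + 1)
  else ((if s.2 ≠ 0 then s.1 ++ [(s.2, i - 1)] else s.1), 0)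

-- body of B's second (best-run) loop
def bstep (b : Int × Int) (p : Int × Int) : Int × Int :=
  if p.1 > b.1 then p else b

def streak_alt (arr : List Int) (n : Int) (strt : Int) : Int × Int × Int :=
  let s := (PySem.List.pyRange 0 n 1).foldl
    (fun s i => stepB s i (PySem.List.pyGetD arr i 0)) ([], 0)
  let runs := if s.2 ≠ 0 then s.1 ++ [(s.2, n - 1)] else s.1
  let b := runs.foldl bstep (0, 0)
  (b.1, b.2 - b.1 + 1, strt)

-- ===== PRECONDITION & SPEC =====
-- A indexes arr[i] for i in range(0, n): IndexError exactly when n > len(arr)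
def Pre_streak (arr : List Int) (n : Int) (strt : Int) : Prop := n ≤ (arr.length : Int)
instance (arr : List Int) (n : Int) (strt : Int) : Decidable (Pre_streak arr n strt) := by unfold Pre_streak; infer_instance
def pvWitness_streak : List Int × Int × Int := ([1, 0, 1, 1], 4, 7)

def Spec_streak (arr : List Int) (n : Int) (strt : Int) (out : Int × Int × Int) : Prop := out = streak_alt arr n strt
instance (arr : List Int) (n : Int) (strt : Int) (out : Int × Int × Int) : Decidable (Spec_streak arr n strt out) := by unfold Spec_streak; infer_instance

-- ===== CLAIM (what is proved, stated in full; the proofs are below) =====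
def Claim_equal_streak : Prop := ∀ (arr : List Int) (n : Int) (strt : Int), Dom_streak arr n strt → Pre_streak arr n strt → Spec_streak arr n strt (streak arr n strt)

-- ===== LEMMAS AND PROOFS =====

-- index-threaded structural fold (proof vehicle for both ports' index loops)
def pvFold2 {σ : Type} (f : σ → Int → Int → σ) : List Int → Int → σ → σ
  | [], _, s => s
  | x :: xs, i, s => pvFold2 f xs (i + 1) (f s i x)

-- a port's foldl over range(i, i+m) reading arr[j] = the structural fold over that slice
theorem pvBridge {σ : Type} (f : σ → Int → Int → σ) (arr : List Int) :
    ∀ (m : Nat) (i : Int) (s : σ), 0 ≤ i → i.toNat + m ≤ arr.length →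
    (PySem.List.pyRange i (i + (m : Int)) 1).foldl
        (fun s j => f s j (PySem.List.pyGetD arr j 0)) s
      = pvFold2 f ((arr.drop i.toNat).take m) i s := by
  intro m
  induction m with
  | zero =>
    intro i s hi hlen
    simp [PySem.List.pyRange_one_eq_nil, pvFold2]
  | succ m ih =>
    intro i s hi hlen
    have hilt : i.toNat < arr.length := by omega
    rw [PySem.List.pyRange_one_cons (by omega)]
    have h2 : i + ((m + 1 : Nat) : Int) = (i + 1) + (m : Int) := by push_cast; ring
    rw [h2]
    rw [List.drop_eq_getElem_cons hilt, List.take_succ_cons]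
    simp only [List.foldl_cons, pvFold2]
    have hget : PySem.List.pyGetD arr i 0 = arr[i.toNat] := by
      apply PySem.List.pyGetD_eq_getElem <;> omega
    rw [hget]
    have h3 : (i + 1).toNat = i.toNat + 1 := by omega
    rw [ih (i + 1) (f s i arr[i.toNat]) (by omega) (by omega), h3]

def pvBest (runs : List (Int × Int)) : Int × Int := runs.foldl bstep (0, 0)

def pvFin (runs : List (Int × Int)) (rl last : Int) : List (Int × Int) :=
  if rl ≠ 0 then runs ++ [(rl, last)] else runs

theorem pvBest_append (runs : List (Int × Int)) (p : Int × Int) :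
    pvBest (runs ++ [p]) = bstep (pvBest runs) p := by
  simp [pvBest, List.foldl_append]

-- the invariant linking A's eager fold to B's run-collecting fold
theorem pvCore : ∀ (ys : List Int) (i r e : Int) (runs : List (Int × Int)) (rl : Int),
    0 ≤ rl →
    pvBest (pvFin runs rl (i - 1)) = (r, e) →
    ((pvFold2 stepA ys i (rl, r, e)).2.1, (pvFold2 stepA ys i (rl, r, e)).2.2)
      = pvBest (pvFin (pvFold2 stepB ys i (runs, rl)).1
                      (pvFold2 stepB ys i (runs, rl)).2 (i + (ys.length : Int) - 1)) := by
  intro ys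
  induction ys with
  | nil =>
    intro i r e runs rl hrl h2
    simpa [pvFold2] using h2.symm
  | cons x t ih =>
    intro i r e runs rl hrl h2
    have hidx : i + ((x :: t).length : Int) - 1 = (i + 1) + (t.length : Int) - 1 := by
      push_cast [List.length_cons]; ring
    rw [hidx]
    by_cases hx : x = 0
    · subst hx
      have hA : stepA (rl, r, e) i 0 = (0, r, e) := by simp [stepA]
      have hB : stepB (runs, rl) i 0 = (pvFin runs rl (i - 1), 0) := by
        simp [stepB, pvFin]
      simp only [pvFold2, hA, hB]
      exact ih (i + 1) r e (pvFin runs rl (i - 1)) 0 le_rfl (by simpa [pvFin] using h2)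
    · have hA : stepA (rl, r, e) i x
          = (rl + 1, if rl + 1 > r then rl + 1 else r, if rl + 1 > r then i else e) := by
        simp [stepA, hx]
        split_ifs <;> simp
      have hB : stepB (runs, rl) i x = (runs, rl + 1) := by simp [stepB, hx]
      simp only [pvFold2, hA, hB]
      apply ih (i + 1) _ _ runs (rl + 1) (by omega)
      -- the extended trailing run satisfies the invariant
      have hfin : pvFin runs (rl + 1) ((i + 1) - 1) = runs ++ [(rl + 1, i)] := by
        have : rl + 1 ≠ 0 := by omega
        simp [pvFin, this]
      rw [hfin, pvBest_append]
      by_cases h0 : rl = 0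
      · subst h0
        have h2' : pvBest runs = (r, e) := by simpa [pvFin] using h2
        rw [h2']
        simp only [bstep]
        split_ifs <;> rfl
      · have hfin2 : pvFin runs rl (i - 1) = runs ++ [(rl, i - 1)] := by simp [pvFin, h0]
        rw [hfin2, pvBest_append] at h2
        rcases hbr : pvBest runs with ⟨br, be⟩
        rw [hbr] at h2
        simp only [bstep] at h2 ⊢
        split_ifs at h2 with hgt
        · rw [Prod.mk.injEq] at h2
          obtain ⟨h2a, h2b⟩ := h2
          subst h2a; subst h2b
          rw [if_pos (by omega), if_pos (by omega), if_pos (by omega)]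
        · rw [Prod.mk.injEq] at h2
          obtain ⟨h2a, h2b⟩ := h2
          subst h2a; subst h2b
          split_ifs <;> rfl

-- ===== VERDICT (by name: the statement is the Claim_ definition above) =====
theorem streak_spec : Claim_equal_streak := by
  intro arr n strt _ hpre
  unfold Spec_streak
  by_cases hn : n ≤ 0
  · simp [streak, streak_alt, PySem.List.pyRange_one_eq_nil hn]
  · replace hn : 0 < n := by omega
    have hm : (0 : Int) + (n.toNat : Int) = n := by omega
    have hlen : (0 : Int).toNat + n.toNat ≤ arr.length := by
      unfold Pre_streak at hpre; omega
    have hA := pvBridge stepA arr n.toNat 0 ((0 : Int), (0 : Int), (0 : Int)) le_rfl hlen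
    have hB := pvBridge stepB arr n.toNat 0 (([] : List (Int × Int)), (0 : Int)) le_rfl hlen
    rw [hm] at hA hB
    simp only [streak, streak_alt, hA, hB]
    have hys : ((arr.drop (0 : Int).toNat).take n.toNat).length = n.toNat := by
      simp; unfold Pre_streak at hpre; omega
    have hcore := pvCore ((arr.drop (0 : Int).toNat).take n.toNat) 0 0 0 [] 0 le_rfl
      (by simp [pvFin, pvBest])
    rw [hys] at hcore
    have hn1 : (0 : Int) + (n.toNat : Int) - 1 = n - 1 := by omega
    rw [hn1] at hcore
    set sA := pvFold2 stepA ((arr.drop (0 : Int).toNat).take n.toNat) 0 ((0:Int), (0:Int), (0:Int)) with hsA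
    set sB := pvFold2 stepB ((arr.drop (0 : Int).toNat).take n.toNat) 0 (([] : List (Int × Int)), (0:Int)) with hsB
    rw [Prod.mk.injEq] at hcore
    obtain ⟨h1, h2⟩ := hcore
    simp only [pvBest, pvFin] at h1 h2
    rw [Prod.mk.injEq, Prod.mk.injEq]
    exact ⟨h1, by rw [h1, h2], rfl⟩
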